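-- pv_equiv track=rewrite | github.com/Slipfaith/moviebot | core/offline_queue.py | _remove_processed_entries
-- ===== SOURCE A (Python) =====
-- from typing import Any, Dict, List, Optional, Sequence, Set
--
-- def _remove_processed_entries(
--     current_entries: List[Dict[str, Any]],
--     processed_entries: List[Dict[str, Any]],
-- ) -> List[Dict[str, Any]]:
--     remaining = list(current_entries)
--     for processed in processed_entries:
--         for index, entry in enumerate(remaining):
--             if entry == processed:
--                 remaining.pop(index)
--                 break
--     return remaining
-- ===== SOURCE B (Python) =====
-- from typing import Any, Dict, List
--
--
-- def _remove_processed_entries(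
--     current_entries: List[Dict[str, Any]],
--     processed_entries: List[Dict[str, Any]],
-- ) -> List[Dict[str, Any]]:
--     # Count, per canonical form, how many copies must be removed; then one pass.
--     need: Dict[tuple, int] = {}
--     for processed in processed_entries:
--         key = tuple(sorted(processed.items()))
--         need[key] = need.get(key, 0) + 1
--     result = []
--     for entry in current_entries:
--         key = tuple(sorted(entry.items()))
--         if need.get(key, 0) > 0:
--             need[key] = need[key] - 1
--         else:
--             result.append(entry)
--     return result
-- ===== Notes on version B (the rewrite author's own statement) =====
-- stated objective: alternative
-- what changed: A rescans the remaining list from the front for every processed entry (pop first dict-equal match); B builds a count table keyed by the canonical key-sorted item tuple of each processed entry once and then does a single pass over current_entries, skipping an entry while its canonical key still has a positive count.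
import Mathlib
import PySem

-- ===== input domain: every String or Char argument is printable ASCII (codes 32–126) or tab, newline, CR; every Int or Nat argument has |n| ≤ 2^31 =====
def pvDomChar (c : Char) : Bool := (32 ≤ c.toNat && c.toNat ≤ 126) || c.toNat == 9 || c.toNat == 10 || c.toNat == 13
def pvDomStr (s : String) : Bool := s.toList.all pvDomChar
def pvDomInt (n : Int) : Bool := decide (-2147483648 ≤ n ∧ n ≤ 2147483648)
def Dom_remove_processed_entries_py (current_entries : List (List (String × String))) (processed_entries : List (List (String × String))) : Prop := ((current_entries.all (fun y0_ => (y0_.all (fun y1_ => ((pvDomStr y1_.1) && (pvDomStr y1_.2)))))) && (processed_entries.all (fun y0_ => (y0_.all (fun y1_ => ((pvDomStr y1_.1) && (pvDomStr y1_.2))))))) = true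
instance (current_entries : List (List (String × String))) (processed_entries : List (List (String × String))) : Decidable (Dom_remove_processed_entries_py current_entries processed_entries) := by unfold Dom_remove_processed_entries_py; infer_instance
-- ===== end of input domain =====

-- Alternative algorithm: B replaces A's repeated first-match scans by a counter keyed on canonical (key-sorted) entries plus a single pass over current_entries.


-- ===== PORT A =====
-- Python dict equality 'entry == processed': same number of keys and every key of the left
-- dict maps to the same value in the right; exact for assoc lists with unique keys (the
-- only lists that represent Python dicts; Pre_ below restricts to them).
def pvDictEq (a b : List (String × String)) : Bool :=
  a.length == b.length && a.all (fun kv => (PySem.Dict.mk b).get? kv.1 == some kv.2)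

def remove_processed_entries_py (current_entries : List (List (String × String))) (processed_entries : List (List (String × String))) : List (List (String × String)) :=
  -- remaining = list(current_entries); for processed in …: scan by enumerate, pop first match, break
  processed_entries.foldl (fun remaining processed =>
    match remaining.findIdx? (fun entry => pvDictEq entry processed) with
    | some index => remaining.eraseIdx index
    | none => remaining) current_entries

-- ===== PORT B =====
-- tuple(sorted(entry.items())): Python sorts the (key, value) pairs; with unique keys (Pre_
-- below) that order is decided by the keys alone, so the key-sorted stable sort is exact.
def pvCanon (e : List (String × String)) : List (String × String) :=
  PySem.List.sorted e (fun kv => kv.1) false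

def remove_processed_entries_py_alt (current_entries : List (List (String × String))) (processed_entries : List (List (String × String))) : List (List (String × String)) :=
  let need := processed_entries.foldl (fun d p => d.modify (pvCanon p) 0 (· + 1))
    (PySem.Dict.empty : PySem.Dict (List (String × String)) Int)
  (current_entries.foldl (fun st e =>
      let k := pvCanon e
      if 0 < st.1.getD k 0 then (st.1.insert k (st.1.getD k 0 - 1), st.2)
      else (st.1, st.2 ++ [e])) (need, ([] : List (List (String × String))))).2

-- ===== PRECONDITION & SPEC =====
-- Pre_ excludes assoc lists that repeat a key inside one entry: such a list represents no
-- Python dict (dict construction collapses duplicate keys), so no Python input is excluded.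
def Pre_remove_processed_entries_py (current_entries : List (List (String × String))) (processed_entries : List (List (String × String))) : Prop :=
  (∀ e ∈ current_entries, (e.map Prod.fst).Nodup) ∧ (∀ e ∈ processed_entries, (e.map Prod.fst).Nodup)
instance (current_entries : List (List (String × String))) (processed_entries : List (List (String × String))) : Decidable (Pre_remove_processed_entries_py current_entries processed_entries) := by unfold Pre_remove_processed_entries_py; infer_instance

def pvWitness_remove_processed_entries_py : (List (List (String × String))) × (List (List (String × String))) :=
  ([[("a", "1")], [("b", "2"), ("a", "1")]], [[("a", "1"), ("b", "2")]])

def Spec_remove_processed_entries_py (current_entries : List (List (String × String))) (processed_entries : List (List (String × String))) (out : List (List (String × String))) : Prop := out = remove_processed_entries_py_alt current_entries processed_entries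
instance (current_entries : List (List (String × String))) (processed_entries : List (List (String × String))) (out : List (List (String × String))) : Decidable (Spec_remove_processed_entries_py current_entries processed_entries out) := by unfold Spec_remove_processed_entries_py; infer_instance

-- ===== CLAIM (what is proved, stated in full; the proofs are below) =====
def Claim_equal_remove_processed_entries_py : Prop := ∀ (current_entries : List (List (String × String))) (processed_entries : List (List (String × String))), Dom_remove_processed_entries_py current_entries processed_entries → Pre_remove_processed_entries_py current_entries processed_entries → Spec_remove_processed_entries_py current_entries processed_entries (remove_processed_entries_py current_entries processed_entries)

-- ===== LEMMAS AND PROOFS =====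

theorem canon_perm (a : List (String × String)) : (pvCanon a).Perm a := PySem.List.sorted_perm a _ false

theorem canon_pairwise_lt (a : List (String × String)) (ha : (a.map Prod.fst).Nodup) :
    (pvCanon a).Pairwise (fun x y => x.1 < y.1) := by
  have h1 : (pvCanon a).Pairwise (fun x y => x.1 ≤ y.1) := PySem.List.sorted_pairwise a _
  have hn : ((pvCanon a).map Prod.fst).Nodup := ((canon_perm a).map Prod.fst).nodup_iff.mpr ha
  have h2 : (pvCanon a).Pairwise (fun x y => x.1 ≠ y.1) := by
    rw [List.nodup_iff_pairwise_ne, List.pairwise_map] at hn; exact hn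
  exact (h1.and h2).imp (fun h => lt_of_le_of_ne h.1 h.2)

theorem canon_eq_iff_perm (a b : List (String × String)) (ha : (a.map Prod.fst).Nodup) :
    pvCanon a = pvCanon b ↔ a.Perm b := by
  constructor
  · intro h; exact ((canon_perm a).symm.trans (h ▸ canon_perm b)).symm.symm
  · intro h
    have := PySem.List.sorted_eq_of_perm_of_pairwise_lt (xs := b) (key := fun kv : String × String => kv.1)
      (ys := pvCanon a) ((canon_perm a).trans h) (canon_pairwise_lt a ha)
    rw [← this]; rfl

theorem dictEq_true_iff (a b : List (String × String))
    (ha : (a.map Prod.fst).Nodup) (hb : (b.map Prod.fst).Nodup) :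
    pvDictEq a b = true ↔ pvCanon a = pvCanon b := by
  have hkeys : (PySem.Dict.mk b).keys.Nodup := hb
  rw [canon_eq_iff_perm a b ha]
  unfold pvDictEq
  simp only [Bool.and_eq_true, beq_iff_eq, List.all_eq_true]
  constructor
  · rintro ⟨hlen, hall⟩
    have hsub : a ⊆ b := by
      intro kv hkv
      have := PySem.Dict.mem_items_of_get?_eq_some (PySem.Dict.mk b) (hall kv hkv)
      simpa using this
    exact List.Subperm.perm_of_length_le (List.subperm_of_subset ha.of_map hsub) (by omega)
  · intro hperm
    refine ⟨hperm.length_eq, fun kv hkv => ?_⟩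
    exact PySem.Dict.get?_of_mem_items (PySem.Dict.mk b) (by simpa using hperm.subset hkv) hkeys

theorem dictEq_iff (a b : List (String × String))
    (ha : (a.map Prod.fst).Nodup) (hb : (b.map Prod.fst).Nodup) :
    pvDictEq a b = (pvCanon a == pvCanon b) :=
  Bool.eq_iff_iff.mpr (by rw [beq_iff_eq]; exact dictEq_true_iff a b ha hb)

-- the single-pass loop body of B, and A's per-processed-entry removal, as named helpers
def pvStep (st : PySem.Dict (List (String × String)) Int × List (List (String × String))) (e : List (String × String)) : PySem.Dict (List (String × String)) Int × List (List (String × String)) :=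
  let k := pvCanon e
  if 0 < st.1.getD k 0 then (st.1.insert k (st.1.getD k 0 - 1), st.2)
  else (st.1, st.2 ++ [e])

def pvEraseFirst (xs : List (List (String × String))) (k : List (String × String)) : List (List (String × String)) :=
  match xs.findIdx? (fun e => pvCanon e == k) with
  | some i => xs.eraseIdx i
  | none => xs

theorem findIdx?_congr' {α : Type} (p q : α → Bool) (l : List α) (h : ∀ x ∈ l, p x = q x) :
    l.findIdx? p = l.findIdx? q := by
  induction l with
  | nil => rfl
  | cons x xs ih =>
    rw [List.findIdx?_cons, List.findIdx?_cons, h x (by simp), ih (fun y hy => h y (List.mem_cons_of_mem _ hy))]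

theorem pvEraseFirst_cons (e : List (String × String)) (xs : List (List (String × String))) (k : List (String × String)) :
    pvEraseFirst (e :: xs) k = if pvCanon e = k then xs else e :: pvEraseFirst xs k := by
  unfold pvEraseFirst
  rw [List.findIdx?_cons]
  by_cases h : pvCanon e = k
  · simp [h]
  · simp only [beq_eq_false_iff_ne.mpr h, if_neg h]
    cases hfi : xs.findIdx? (fun e => pvCanon e == k) <;> simp

theorem pvEraseFirst_subset (xs : List (List (String × String))) (k : List (String × String)) :
    pvEraseFirst xs k ⊆ xs := by
  unfold pvEraseFirst
  cases hfi : xs.findIdx? (fun e => pvCanon e == k)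
  · exact fun x h => h
  · exact List.eraseIdx_subset

theorem pass_congr (xs : List (List (String × String))) (n1 n2 : PySem.Dict (List (String × String)) Int) (res : List (List (String × String)))
    (h : ∀ k, n1.getD k 0 = n2.getD k 0) :
    (xs.foldl pvStep (n1, res)).2 = (xs.foldl pvStep (n2, res)).2 := by
  induction xs generalizing n1 n2 res with
  | nil => rfl
  | cons e xs ih =>
    simp only [List.foldl_cons, pvStep]
    rw [h (pvCanon e)]
    by_cases hc : 0 < n2.getD (pvCanon e) 0
    · simp only [if_pos hc]
      exact ih _ _ _ (by
        intro j
        rw [PySem.Dict.getD_insert, PySem.Dict.getD_insert]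
        by_cases hj : j = pvCanon e <;> simp [hj, h j])
    · simp only [if_neg hc]
      exact ih _ _ _ h

theorem pass_zero (xs : List (List (String × String))) (n : PySem.Dict (List (String × String)) Int) (res : List (List (String × String)))
    (h : ∀ k, n.getD k 0 = 0) :
    (xs.foldl pvStep (n, res)).2 = res ++ xs := by
  induction xs generalizing res with
  | nil => simp
  | cons e xs ih =>
    simp only [List.foldl_cons, pvStep, h (pvCanon e)]
    norm_num
    rw [ih (res ++ [e])]
    simp

theorem pass_modify (xs : List (List (String × String))) (k : List (String × String)) (n : PySem.Dict (List (String × String)) Int) (res : List (List (String × String)))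
    (hinv : ∀ j, 0 ≤ n.getD j 0) :
    (xs.foldl pvStep (n.modify k 0 (· + 1), res)).2 = ((pvEraseFirst xs k).foldl pvStep (n, res)).2 := by
  induction xs generalizing n res with
  | nil => rfl
  | cons e xs ih =>
    rw [pvEraseFirst_cons]
    by_cases hek : pvCanon e = k
    · simp only [List.foldl_cons, pvStep, hek, if_true]
      rw [PySem.Dict.getD_modify_self]
      have hpos : 0 < n.getD k 0 + 1 := by have := hinv k; omega
      simp only [if_pos hpos]
      refine pass_congr _ _ _ _ ?_
      intro j
      rw [PySem.Dict.getD_insert]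
      by_cases hj : j = k
      · simp [hj]
      · rw [if_neg hj, PySem.Dict.getD_modify, if_neg hj]
    · simp only [if_neg hek, List.foldl_cons, pvStep]
      rw [PySem.Dict.getD_modify, if_neg hek]
      by_cases hc : 0 < n.getD (pvCanon e) 0
      · simp only [if_pos hc]
        rw [pass_congr _ _ ((n.insert (pvCanon e) (n.getD (pvCanon e) 0 - 1)).modify k 0 (· + 1)) _ (by
          intro j
          simp only [PySem.Dict.getD_modify, PySem.Dict.getD_insert]
          by_cases hj1 : j = k <;> by_cases hj2 : j = pvCanon e <;> simp_all)]
        exact ih _ _ (by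
          intro j
          rw [PySem.Dict.getD_insert]
          by_cases hj : j = pvCanon e
          · rw [if_pos hj]; omega
          · rw [if_neg hj]; exact hinv j)
      · simp only [if_neg hc]
        exact ih _ _ hinv

theorem getD_need (l : List (List (String × String))) (d : PySem.Dict (List (String × String)) Int) (j : List (String × String)) :
    (l.foldl (fun d p => d.modify (pvCanon p) 0 (· + 1)) d).getD j 0 = d.getD j 0 + (l.map pvCanon).count j := by
  have h := PySem.Dict.getD_foldl_modify_add_one (l.map pvCanon) d j
  rw [List.foldl_map] at h
  exact h

theorem alt_char (proc cur : List (List (String × String))) :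
    (cur.foldl pvStep (proc.foldl (fun d p => d.modify (pvCanon p) 0 (· + 1)) (PySem.Dict.empty : PySem.Dict (List (String × String)) Int), ([] : List (List (String × String))))).2
      = proc.foldl (fun r p => pvEraseFirst r (pvCanon p)) cur := by
  induction proc generalizing cur with
  | nil => simpa using pass_zero cur PySem.Dict.empty [] (fun k => by simp [PySem.Dict.getD_empty])
  | cons p ps ih =>
    rw [List.foldl_cons]
    have h1 : ∀ j, ((p :: ps).foldl (fun d p => d.modify (pvCanon p) 0 (· + 1)) (PySem.Dict.empty : PySem.Dict (List (String × String)) Int)).getD j 0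
        = ((ps.foldl (fun d p => d.modify (pvCanon p) 0 (· + 1)) (PySem.Dict.empty : PySem.Dict (List (String × String)) Int)).modify (pvCanon p) 0 (· + 1)).getD j 0 := by
      intro j
      simp only [getD_need, PySem.Dict.getD_modify, List.map_cons, List.count_cons,
        PySem.Dict.getD_empty, beq_iff_eq]
      by_cases hj : j = pvCanon p
      · subst hj; simp only [if_pos]; push_cast; omega
      · simp only [if_neg hj, if_neg (show ¬ pvCanon p = j from fun h => hj h.symm)]
        push_cast; omega
    calc (cur.foldl pvStep ((p :: ps).foldl (fun d p => d.modify (pvCanon p) 0 (· + 1)) (PySem.Dict.empty : PySem.Dict (List (String × String)) Int), ([] : List (List (String × String))))).2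
        = (cur.foldl pvStep ((ps.foldl (fun d p => d.modify (pvCanon p) 0 (· + 1)) (PySem.Dict.empty : PySem.Dict (List (String × String)) Int)).modify (pvCanon p) 0 (· + 1), ([] : List (List (String × String))))).2 :=
          pass_congr _ _ _ _ h1
      _ = ((pvEraseFirst cur (pvCanon p)).foldl pvStep (ps.foldl (fun d p => d.modify (pvCanon p) 0 (· + 1)) (PySem.Dict.empty : PySem.Dict (List (String × String)) Int), ([] : List (List (String × String))))).2 :=
          pass_modify _ _ _ _ (fun j => by rw [getD_need, PySem.Dict.getD_empty]; positivity)
      _ = ps.foldl (fun r p => pvEraseFirst r (pvCanon p)) (pvEraseFirst cur (pvCanon p)) := ih _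

theorem alt_eq (cur proc : List (List (String × String))) :
    remove_processed_entries_py_alt cur proc = proc.foldl (fun r p => pvEraseFirst r (pvCanon p)) cur := by
  unfold remove_processed_entries_py_alt
  exact alt_char proc cur

theorem A_char (proc cur : List (List (String × String)))
    (hc : ∀ e ∈ cur, (e.map Prod.fst).Nodup) (hp : ∀ q ∈ proc, (q.map Prod.fst).Nodup) :
    remove_processed_entries_py cur proc = proc.foldl (fun r p => pvEraseFirst r (pvCanon p)) cur := by
  induction proc generalizing cur with
  | nil => rfl
  | cons p ps ih =>
    unfold remove_processed_entries_py
    rw [List.foldl_cons, List.foldl_cons]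
    have hstep : (match cur.findIdx? (fun e => pvDictEq e p) with
        | some index => cur.eraseIdx index
        | none => cur) = pvEraseFirst cur (pvCanon p) := by
      unfold pvEraseFirst
      rw [findIdx?_congr' _ (fun e => pvCanon e == pvCanon p) cur
        (fun e he => dictEq_iff e p (hc e he) (hp p (by simp)))]
    rw [hstep]
    have := ih (pvEraseFirst cur (pvCanon p))
      (fun e he => hc e (pvEraseFirst_subset cur (pvCanon p) he))
      (fun q hq => hp q (by simp [hq]))
    unfold remove_processed_entries_py at this
    exact this

-- ===== VERDICT (by name: the statement is the Claim_ definition above) =====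
theorem remove_processed_entries_py_spec : Claim_equal_remove_processed_entries_py := by
  intro cur proc _ hpre
  unfold Spec_remove_processed_entries_py
  rw [A_char proc cur hpre.1 hpre.2, alt_eq]
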